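-- pv_equiv track=rewrite | github.com/paulhenrique/fw | fw.py | tratar_entrada
-- ===== SOURCE A (Python) =====
-- def tratar_entrada(entradas, atributo):
--     n = len(entradas)
--     for i in range (1, n):
--         try:
--             dado = entradas[i].split("=")
--             if dado[0]==atributo:
--                 resultado=dado[1]
--         except IndexError:
--             dado = "Erro"
--     return resultado
-- ===== SOURCE B (Python) =====
-- def tratar_entrada(entradas, atributo):
--     # Reverse scan stopping at the first (i.e. last-by-index) qualifying entry,
--     # instead of a forward full scan that keeps overwriting the running result.
--     for entrada in reversed(entradas[1:]):
--         dado = entrada.split("=")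
--         if dado[0] == atributo and len(dado) > 1:
--             resultado = dado[1]
--             break
--     return resultado
-- ===== Notes on version B (the rewrite author's own statement) =====
-- stated objective: alternative
-- what changed: Replaces the forward full scan over indices 1..n-1 (which keeps overwriting a running result, with a try/except around the indexing) by a reverse scan over entradas[1:] that stops at the first qualifying entry, testing len(dado)>1 explicitly instead of catching IndexError.
import Mathlib
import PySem

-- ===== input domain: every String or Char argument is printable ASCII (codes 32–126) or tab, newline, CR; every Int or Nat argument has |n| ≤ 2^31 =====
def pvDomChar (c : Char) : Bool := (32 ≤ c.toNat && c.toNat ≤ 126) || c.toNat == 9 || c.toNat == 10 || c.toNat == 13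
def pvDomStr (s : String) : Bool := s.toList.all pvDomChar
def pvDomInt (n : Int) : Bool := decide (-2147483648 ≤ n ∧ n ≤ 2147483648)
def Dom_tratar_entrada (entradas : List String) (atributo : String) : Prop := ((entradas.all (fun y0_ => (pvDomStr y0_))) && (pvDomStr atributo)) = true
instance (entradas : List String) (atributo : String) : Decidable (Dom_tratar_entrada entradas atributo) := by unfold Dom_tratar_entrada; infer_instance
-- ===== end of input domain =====

-- B replaces A's forward index scan (overwrite a running result, try/except around dado[1])
-- by a reverse scan over entradas[1:] that stops at the first qualifying entry (objective: alternative).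

-- ===== PORT A =====
-- shared helper: Python's s.split("=") (nonempty separator, so split? is always some)
def pvSplitEq (s : String) : List String := (PySem.Str.split? s "=").getD []

def tratar_entrada (entradas : List String) (atributo : String) : String :=
  let n : Int := entradas.length
  let resultado : Option String :=
    (PySem.List.pyRange 1 n 1).foldl (fun resultado i =>
      let dado := pvSplitEq (PySem.List.pyGetD entradas i "")
      if (PySem.List.pyGet? dado 0).getD "" = atributo then
        match PySem.List.pyGet? dado 1 with
        | some v => some v          -- resultado = dado[1]
        | none   => resultado       -- IndexError caught (dado = "Erro"), resultado unchanged
      else resultado) none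
  resultado.getD ""                 -- none = UnboundLocalError: excluded by Pre_

-- ===== PORT B =====
-- the reverse loop with break: first entry (of the reversed list) whose split has
-- dado[0] == atributo and len(dado) > 1
def tratar_entrada_alt_go (atributo : String) : List String → Option String
  | [] => none
  | entrada :: rest =>
    let dado := pvSplitEq entrada
    if (PySem.List.pyGet? dado 0).getD "" = atributo ∧ 1 < dado.length then
      PySem.List.pyGet? dado 1      -- some dado[1] under the guard; break
    else tratar_entrada_alt_go atributo rest

def tratar_entrada_alt (entradas : List String) (atributo : String) : String :=
  (tratar_entrada_alt_go atributo ((entradas.drop 1).reverse)).getD ""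
  -- none = UnboundLocalError: excluded by Pre_

-- ===== PRECONDITION & SPEC =====
-- Pre_ excludes exactly the inputs on which the Python A raises UnboundLocalError
-- (no entry past index 0 splits into dado with dado[0] == atributo and len(dado) > 1).
def Pre_tratar_entrada (entradas : List String) (atributo : String) : Prop :=
  ∃ e ∈ entradas.drop 1,
    (PySem.List.pyGet? (pvSplitEq e) 0).getD "" = atributo ∧
    1 < (pvSplitEq e).length
instance (entradas : List String) (atributo : String) : Decidable (Pre_tratar_entrada entradas atributo) := by unfold Pre_tratar_entrada; infer_instance

def pvWitness_tratar_entrada : List String × String := (["x", "a=1"], "a")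

def Spec_tratar_entrada (entradas : List String) (atributo : String) (out : String) : Prop := out = tratar_entrada_alt entradas atributo
instance (entradas : List String) (atributo : String) (out : String) : Decidable (Spec_tratar_entrada entradas atributo out) := by unfold Spec_tratar_entrada; infer_instance

-- ===== CLAIM (what is proved, stated in full; the proofs are below) =====
def Claim_equal_tratar_entrada : Prop := ∀ (entradas : List String) (atributo : String), Dom_tratar_entrada entradas atributo → Pre_tratar_entrada entradas atributo → Spec_tratar_entrada entradas atributo (tratar_entrada entradas atributo)

-- ===== LEMMAS AND PROOFS =====

-- the value an entry contributes: some dado[1] iff dado[0] == atributo and len(dado) > 1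
def pvHit (atributo e : String) : Option String :=
  let dado := pvSplitEq e
  if (PySem.List.pyGet? dado 0).getD "" = atributo then PySem.List.pyGet? dado 1 else none

lemma pvGet1_eq_none_iff (dado : List String) :
    PySem.List.pyGet? dado 1 = none ↔ ¬ 1 < dado.length := by
  rw [PySem.List.pyGet?_eq_none_iff, PySem.Raise.InRange]
  omega

-- A's loop body keeps the last hit
lemma stepA_eq (atributo : String) (r : Option String) (e : String) :
    (let dado := pvSplitEq e
     if (PySem.List.pyGet? dado 0).getD "" = atributo then
       match PySem.List.pyGet? dado 1 with
       | some v => some v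
       | none   => r
     else r) = (pvHit atributo e).or r := by
  simp only [pvHit]
  split_ifs with h
  · cases PySem.List.pyGet? (pvSplitEq e) 1 <;> simp [Option.or]
  · simp [Option.or]

-- B's loop returns the first hit of its (reversed) list
lemma go_eq_findSome? (atributo : String) (l : List String) :
    tratar_entrada_alt_go atributo l = l.findSome? (pvHit atributo) := by
  induction l with
  | nil => simp [tratar_entrada_alt_go]
  | cons e rest ih =>
    rw [List.findSome?_cons]
    by_cases h0 : (PySem.List.pyGet? (pvSplitEq e) 0).getD "" = atributo
    · by_cases h1 : 1 < (pvSplitEq e).length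
      · rcases hg : PySem.List.pyGet? (pvSplitEq e) 1 with _ | v
        · exact absurd ((pvGet1_eq_none_iff _).mp hg) (by omega)
        · simp [tratar_entrada_alt_go, pvHit, h0, h1]
      · have hn : PySem.List.pyGet? (pvSplitEq e) 1 = none :=
          (pvGet1_eq_none_iff _).mpr h1
        simp [tratar_entrada_alt_go, pvHit, h0, h1, hn, ih]
    · simp [tratar_entrada_alt_go, pvHit, h0, ih]

-- keeping the LAST hit of a forward fold = the FIRST hit of the reversed list
lemma foldl_or_eq_findSome?_reverse (f : String → Option String) (l : List String)
    (init : Option String) :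
    l.foldl (fun r e => (f e).or r) init = (l.reverse.findSome? f).or init := by
  induction l generalizing init with
  | nil => simp
  | cons a l ih =>
    simp only [List.foldl_cons, List.reverse_cons, List.findSome?_append, ih]
    rcases l.reverse.findSome? f with _ | v <;> simp [Option.or]

theorem tratar_entrada_eq_alt (entradas : List String) (atributo : String) :
    tratar_entrada entradas atributo = tratar_entrada_alt entradas atributo := by
  unfold tratar_entrada tratar_entrada_alt
  have hstep : ∀ (r : Option String) (e : String),
      (let dado := pvSplitEq e
       if (PySem.List.pyGet? dado 0).getD "" = atributo then
         match PySem.List.pyGet? dado 1 with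
         | some v => some v
         | none   => r
       else r) = (pvHit atributo e).or r := stepA_eq atributo
  rw [go_eq_findSome?]
  have hfold :
      (PySem.List.pyRange 1 (entradas.length : Int) 1).foldl (fun resultado i =>
        let dado := pvSplitEq (PySem.List.pyGetD entradas i "")
        if (PySem.List.pyGet? dado 0).getD "" = atributo then
          match PySem.List.pyGet? dado 1 with
          | some v => some v
          | none   => resultado
        else resultado) none
      = (entradas.drop 1).foldl (fun r e => (pvHit atributo e).or r) none := by
    have hrange := PySem.List.foldl_pyRange_pyGetD' entradas ""
      (fun r e => (pvHit atributo e).or r) (none : Option String) (a := 1) (by norm_num)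
    have hf : (fun (resultado : Option String) (i : Int) =>
        let dado := pvSplitEq (PySem.List.pyGetD entradas i "")
        if (PySem.List.pyGet? dado 0).getD "" = atributo then
          match PySem.List.pyGet? dado 1 with
          | some v => some v
          | none   => resultado
        else resultado)
        = fun (r : Option String) (i : Int) =>
            (pvHit atributo (PySem.List.pyGetD entradas i "")).or r :=
      funext fun r => funext fun i => hstep r _
    rw [hf]
    simpa using hrange
  simp only [hfold, foldl_or_eq_findSome?_reverse, Option.or_none]

-- ===== VERDICT (by name: the statement is the Claim_ definition above) =====
theorem tratar_entrada_spec : Claim_equal_tratar_entrada := by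
  intro entradas atributo _ _
  exact tratar_entrada_eq_alt entradas atributo
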